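-- pv_equiv track=rewrite | github.com/tan90cot0/Comp-Coding | cp.py | good_pairs
-- ===== SOURCE A (Python) =====
-- def good_pairs(word):
--     n = len(word)
--     cnt=0
--     for i in range(n-1):
--         for j in range(i+1, n):
--             if word[i]==word[j]:
--                 cnt+=1
--                 continue
--             else:
--                 for k in range(i, j):
--                     if word[k]!=word[k+1] and (word[k]!=word[i] or word[k+1]!=word[j]):
--                         cnt+=1
--                         break
--     return cnt
-- ===== SOURCE B (Python) =====
-- def good_pairs(word):
--     n = len(word)
--     # pre[m] = number of positions k < m with word[k] != word[k+1]
--     pre = [0]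
--     for k in range(n - 1):
--         pre.append(pre[-1] + (word[k] != word[k + 1]))
--     cnt = 0
--     for i in range(n - 1):
--         for j in range(i + 1, n):
--             if word[i] == word[j] or pre[j] - pre[i] >= 2:
--                 cnt += 1
--     return cnt
-- ===== Notes on version B (the rewrite author's own statement) =====
-- stated objective: faster
-- what changed: The O(n) inner break-scan per pair is removed: B precomputes a prefix array of adjacent-change counts once and decides each pair with the O(1) test word[i]==word[j] or pre[j]-pre[i]>=2, dropping the complexity from O(n^3) to O(n^2).
import Mathlib
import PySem

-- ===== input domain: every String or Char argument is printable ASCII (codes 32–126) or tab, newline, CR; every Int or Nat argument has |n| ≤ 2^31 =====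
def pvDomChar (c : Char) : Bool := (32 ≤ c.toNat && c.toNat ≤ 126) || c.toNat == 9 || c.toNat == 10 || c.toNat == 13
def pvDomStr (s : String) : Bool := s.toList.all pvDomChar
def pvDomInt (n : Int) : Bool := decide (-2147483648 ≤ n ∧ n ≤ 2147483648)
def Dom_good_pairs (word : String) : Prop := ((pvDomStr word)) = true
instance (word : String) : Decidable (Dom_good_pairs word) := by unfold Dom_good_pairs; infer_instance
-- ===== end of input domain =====

-- B replaces A's per-pair inner break-scan by a once-computed prefix array of adjacent-change
-- counts, deciding each pair in O(1): O(n^2) instead of O(n^3). Equivalence is exact on all inputs.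

-- word[k] (indices used by both programs are always in range, so a default is harmless)
def pvG (word : String) (k : Int) : Char := PySem.List.pyGetD word.toList k ' '

-- ===== PORT A =====
def good_pairs (word : String) : Int :=
  let n : Int := PySem.Str.len word
  (PySem.List.pyRange 0 (n - 1) 1).foldl (fun cnt i =>
    (PySem.List.pyRange (i + 1) n 1).foldl (fun cnt j =>
      if pvG word i = pvG word j then cnt + 1
      else
        -- 'for k in range(i, j): if …: cnt += 1; break' = one increment iff some k matches
        if (PySem.List.pyRange i j 1).any (fun k =>
            decide (pvG word k ≠ pvG word (k + 1) ∧
              (pvG word k ≠ pvG word i ∨ pvG word (k + 1) ≠ pvG word j)))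
        then cnt + 1 else cnt) cnt) 0

-- ===== PORT B =====
-- pre[m] = number of positions k < m with word[k] != word[k+1]
def pvPre (word : String) : List Int :=
  (PySem.List.pyRange 0 (PySem.Str.len word - 1) 1).foldl
    (fun pre k => pre ++ [PySem.List.pyGetD pre (-1) 0 +
      (if pvG word k ≠ pvG word (k + 1) then 1 else 0)]) [0]

def good_pairs_alt (word : String) : Int :=
  let n : Int := PySem.Str.len word
  let pre : List Int := pvPre word
  (PySem.List.pyRange 0 (n - 1) 1).foldl (fun cnt i =>
    (PySem.List.pyRange (i + 1) n 1).foldl (fun cnt j =>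
      if pvG word i = pvG word j ∨
          2 ≤ PySem.List.pyGetD pre j 0 - PySem.List.pyGetD pre i 0
      then cnt + 1 else cnt) cnt) 0

-- ===== PRECONDITION & SPEC =====
def Spec_good_pairs (word : String) (out : Int) : Prop := out = good_pairs_alt word
instance (word : String) (out : Int) : Decidable (Spec_good_pairs word out) := by unfold Spec_good_pairs; infer_instance

-- ===== CLAIM (what is proved, stated in full; the proofs are below) =====
def Claim_equal_good_pairs : Prop := ∀ (word : String), Dom_good_pairs word → Spec_good_pairs word (good_pairs word)

-- ===== LEMMAS AND PROOFS =====

-- number of adjacent changes at positions i ≤ k < j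
def pvChg (g : Int → Char) (i j : Int) : ℕ :=
  (PySem.List.pyRange i j 1).countP (fun k => decide (g k ≠ g (k + 1)))

lemma pvChg_eq_card (g : Int → Char) (i j : Int) :
    pvChg g i j = ((Finset.Ico i j).filter (fun k => g k ≠ g (k + 1))).card := by
  unfold pvChg
  rw [List.countP_eq_length_filter,
    ← List.toFinset_card_of_nodup ((PySem.List.nodup_pyRange_one _ _).filter _)]
  congr 1
  ext x
  simp [PySem.List.mem_pyRange_one, Finset.mem_Ico]

lemma pvConst (g : Int → Char) (i j : Int)
    (h : ∀ k, i ≤ k → k < j → g k = g (k + 1)) :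
    ∀ m, i ≤ m → m ≤ j → g m = g i := by
  intro m him hmj
  induction m, him using Int.le_induction with
  | base => rfl
  | succ n hn ih =>
    have hnj : n < j := by omega
    rw [← h n hn hnj]
    exact ih (by omega)

lemma pvNotExists (g : Int → Char) (i j : Int) (hle : pvChg g i j ≤ 1) :
    ¬ ∃ k, i ≤ k ∧ k < j ∧ g k ≠ g (k + 1) ∧ (g k ≠ g i ∨ g (k + 1) ≠ g j) := by
  rw [pvChg_eq_card] at hle
  rintro ⟨k, hik, hkj, hchg, hor⟩
  have hkmem : k ∈ (Finset.Ico i j).filter (fun k => g k ≠ g (k + 1)) := by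
    simp [Finset.mem_filter, Finset.mem_Ico, hik, hkj, hchg]
  have hcard : ((Finset.Ico i j).filter (fun k => g k ≠ g (k + 1))).card = 1 :=
    le_antisymm hle (Finset.card_pos.mpr ⟨k, hkmem⟩)
  obtain ⟨t, ht⟩ := Finset.card_eq_one.mp hcard
  have hkt : k = t := by
    have := ht ▸ hkmem
    simpa using this
  subst hkt
  have hno : ∀ m, i ≤ m → m < j → m ≠ k → g m = g (m + 1) := by
    intro m h1 h2 hne
    by_contra hc
    have hm : m ∈ (Finset.Ico i j).filter (fun k => g k ≠ g (k + 1)) := by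
      simp [Finset.mem_filter, Finset.mem_Ico, h1, h2, hc]
    rw [ht] at hm
    exact hne (by simpa using hm)
  have h1 : g k = g i :=
    pvConst g i k (fun m hm1 hm2 => hno m hm1 (by omega) (by omega)) k hik le_rfl
  have h2 : g j = g (k + 1) :=
    pvConst g (k + 1) j
      (fun m hm1 hm2 => hno m (by omega) hm2 (by omega)) j (by omega) le_rfl
  rcases hor with h | h
  · exact h h1
  · exact h h2.symm

lemma pvExists (g : Int → Char) (i j : Int) (hne : g i ≠ g j)
    (h2 : 2 ≤ pvChg g i j) :
    ∃ k, i ≤ k ∧ k < j ∧ g k ≠ g (k + 1) ∧ (g k ≠ g i ∨ g (k + 1) ≠ g j) := by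
  rw [pvChg_eq_card] at h2
  set S := (Finset.Ico i j).filter (fun k => g k ≠ g (k + 1)) with hS
  have hSne : S.Nonempty := Finset.card_pos.mp (by omega)
  set t1 := S.min' hSne with ht1def
  have ht1 : t1 ∈ S := S.min'_mem hSne
  have ht1' : (i ≤ t1 ∧ t1 < j) ∧ g t1 ≠ g (t1 + 1) := by
    simpa [hS, Finset.mem_filter, Finset.mem_Ico] using ht1
  have hg1 : g t1 = g i := by
    refine pvConst g i t1 (fun m hm1 hm2 => ?_) t1 ht1'.1.1 le_rfl
    by_contra hc
    have hm : m ∈ S := by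
      simp only [hS, Finset.mem_filter, Finset.mem_Ico]
      exact ⟨⟨hm1, by omega⟩, hc⟩
    have := S.min'_le m hm
    omega
  by_cases hc : g (t1 + 1) = g j
  · have hS' : (S.filter (fun s => t1 < s)).Nonempty := by
      by_contra hemp
      rw [Finset.not_nonempty_iff_eq_empty, Finset.filter_eq_empty_iff] at hemp
      have hsub : S ⊆ {t1} := by
        intro s hs
        have h1 := S.min'_le s hs
        have h2' := hemp hs
        simp only [Finset.mem_singleton]
        omega
      have := Finset.card_le_card hsub
      simp at this
      omega
    set t2 := (S.filter (fun s => t1 < s)).min' hS' with ht2def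
    have ht2 : t2 ∈ S.filter (fun s => t1 < s) := (S.filter _).min'_mem hS'
    have ht2' : ((i ≤ t2 ∧ t2 < j) ∧ g t2 ≠ g (t2 + 1)) ∧ t1 < t2 := by
      simpa [hS, Finset.mem_filter, Finset.mem_Ico] using ht2
    have hg2 : g t2 = g (t1 + 1) := by
      refine pvConst g (t1 + 1) t2 (fun m hm1 hm2 => ?_) t2 (by omega) le_rfl
      by_contra hcc
      have hm : m ∈ S.filter (fun s => t1 < s) := by
        simp only [Finset.mem_filter, hS, Finset.mem_Ico]
        exact ⟨⟨⟨by omega, by omega⟩, hcc⟩, by omega⟩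
      have := (S.filter _).min'_le m hm
      omega
    exact ⟨t2, ht2'.1.1.1, ht2'.1.1.2, ht2'.1.2,
      Or.inl (by rw [hg2, hc]; exact fun h => hne h.symm)⟩
  · exact ⟨t1, ht1'.1.1, ht1'.1.2, ht1'.2, Or.inr hc⟩

lemma pvChg_add (g : Int → Char) (i j : Int) (h0 : 0 ≤ i) (hij : i ≤ j) :
    pvChg g 0 j = pvChg g 0 i + pvChg g i j := by
  simp only [pvChg_eq_card]
  rw [← Finset.Ico_union_Ico_eq_Ico h0 hij, Finset.filter_union,
    Finset.card_union_of_disjoint]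
  exact Finset.disjoint_filter_filter (Finset.Ico_disjoint_Ico_consecutive 0 i j)

lemma pvChg_succ (g : Int → Char) (m : Int) (h0 : 0 ≤ m) :
    pvChg g 0 (m + 1) = pvChg g 0 m + (if g m ≠ g (m + 1) then 1 else 0) := by
  rw [pvChg_add g m (m + 1) h0 (by omega)]
  congr 1
  rw [pvChg_eq_card,
    show Finset.Ico m (m + 1) = {m} from by ext x; simp [Finset.mem_Ico]; omega]
  by_cases h : g m ≠ g (m + 1) <;> simp [Finset.filter_singleton, h]

-- the prefix list B builds, characterised
lemma pvPre_fold (word : String) (m : ℕ) :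
    (PySem.List.pyRange 0 (m : Int) 1).foldl
      (fun pre k => pre ++ [PySem.List.pyGetD pre (-1) 0 +
        (if pvG word k ≠ pvG word (k + 1) then 1 else 0)]) [0] =
    (List.range (m + 1)).map (fun t : ℕ => (pvChg (pvG word) 0 (t : Int) : Int)) := by
  induction m with
  | zero =>
    simp [PySem.List.pyRange_one_eq_nil, List.range_succ, pvChg,
      PySem.List.pyRange_one_eq_nil]
  | succ m ih =>
    rw [show ((m + 1 : ℕ) : Int) = (m : Int) + 1 by push_cast; ring,
      PySem.List.pyRange_one_succ_right (by positivity), List.foldl_append, ih]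
    simp only [List.foldl_cons, List.foldl_nil]
    rw [List.range_succ (n := m + 1), List.map_append]
    congr 1
    simp only [List.map_cons, List.map_nil]
    congr 1
    have hlast : PySem.List.pyGetD
        ((List.range (m + 1)).map (fun t : ℕ => (pvChg (pvG word) 0 (t : Int) : Int))) (-1) 0 =
        (pvChg (pvG word) 0 (m : Int) : Int) := by
      rw [show (List.range (m + 1)).map (fun t : ℕ => (pvChg (pvG word) 0 (t : Int) : Int)) =
          ((List.range m).map fun t : ℕ => (pvChg (pvG word) 0 (t : Int) : Int)) ++
            [(pvChg (pvG word) 0 (m : Int) : Int)] by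
        rw [List.range_succ, List.map_append]; rfl]
      simp [PySem.List.pyGetD, PySem.List.pyGet?_neg_one_append_singleton]
    rw [hlast, show ((m + 1 : ℕ) : Int) = (m : Int) + 1 by push_cast; ring,
      pvChg_succ (pvG word) m (by positivity)]
    split_ifs with h <;> push_cast <;> try ring

lemma pvPre_get (word : String) (j : Int) (h0 : 0 ≤ j)
    (hj : j ≤ PySem.Str.len word - 1) :
    PySem.List.pyGetD (pvPre word) j 0 = (pvChg (pvG word) 0 j : Int) := by
  have hn : 0 ≤ PySem.Str.len word - 1 := le_trans h0 hj
  unfold pvPre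
  rw [show PySem.Str.len word - 1 = ((PySem.Str.len word - 1).toNat : Int) by omega,
    pvPre_fold]
  rw [show j = ((j.toNat : ℕ) : Int) by omega, PySem.List.pyGetD_natCast,
    PySem.List.getD_map_range _ _ _ _ (by omega)]

-- the per-pair indicator equivalence
lemma pvPair (word : String) (i j : Int) (h0 : 0 ≤ i) (hij : i < j)
    (hj : j ≤ PySem.Str.len word - 1) :
    (if pvG word i = pvG word j then true
     else (PySem.List.pyRange i j 1).any (fun k =>
        decide (pvG word k ≠ pvG word (k + 1) ∧
          (pvG word k ≠ pvG word i ∨ pvG word (k + 1) ≠ pvG word j)))) =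
    decide (pvG word i = pvG word j ∨
      2 ≤ PySem.List.pyGetD (pvPre word) j 0 - PySem.List.pyGetD (pvPre word) i 0) := by
  rw [pvPre_get word j (by omega) hj, pvPre_get word i (by omega) (by omega)]
  by_cases hgg : pvG word i = pvG word j
  · simp [hgg]
  · rw [if_neg hgg]
    have hadd : pvChg (pvG word) 0 j = pvChg (pvG word) 0 i + pvChg (pvG word) i j :=
      pvChg_add (pvG word) i j h0 (by omega)
    by_cases h2 : 2 ≤ pvChg (pvG word) i j
    · obtain ⟨k, hk1, hk2, hk3, hk4⟩ := pvExists (pvG word) i j hgg h2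
      have hl : (PySem.List.pyRange i j 1).any (fun k =>
          decide (pvG word k ≠ pvG word (k + 1) ∧
            (pvG word k ≠ pvG word i ∨ pvG word (k + 1) ≠ pvG word j))) = true := by
        rw [List.any_eq_true]
        exact ⟨k, PySem.List.mem_pyRange_one.mpr ⟨hk1, hk2⟩, by simp [hk3, hk4]⟩
      rw [hl]
      have : 2 ≤ (pvChg (pvG word) 0 j : Int) - (pvChg (pvG word) 0 i : Int) := by
        omega
      simp [this]
    · have hnex := pvNotExists (pvG word) i j (by omega)
      have hl : (PySem.List.pyRange i j 1).any (fun k =>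
          decide (pvG word k ≠ pvG word (k + 1) ∧
            (pvG word k ≠ pvG word i ∨ pvG word (k + 1) ≠ pvG word j))) = false := by
        rw [← Bool.not_eq_true, List.any_eq_true]
        rintro ⟨k, hkmem, hk⟩
        rw [PySem.List.mem_pyRange_one] at hkmem
        rw [decide_eq_true_iff] at hk
        exact hnex ⟨k, hkmem.1, hkmem.2, hk⟩
      rw [hl]
      have : ¬ (2 ≤ (pvChg (pvG word) 0 j : Int) - (pvChg (pvG word) 0 i : Int)) := by
        omega
      simp [hgg, this]

-- ===== VERDICT (by name: the statement is the Claim_ definition above) =====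
theorem good_pairs_spec : Claim_equal_good_pairs := by
  intro word _
  unfold Spec_good_pairs
  simp only [good_pairs, good_pairs_alt]
  refine PySem.List.foldl_congr_mem _ _ _ _ ?_
  intro cnt i hi
  refine PySem.List.foldl_congr_mem _ _ _ _ ?_
  intro cnt' j hj
  rw [PySem.List.mem_pyRange_one] at hi hj
  have h := pvPair word i j (by omega) (by omega) (by omega)
  by_cases hgg : pvG word i = pvG word j
  · rw [if_pos hgg, if_pos (Or.inl hgg)]
  · rw [if_neg hgg] at h ⊢
    by_cases hb : pvG word i = pvG word j ∨
        2 ≤ PySem.List.pyGetD (pvPre word) j 0 - PySem.List.pyGetD (pvPre word) i 0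
    · rw [if_pos hb]
      have ha : (PySem.List.pyRange i j 1).any (fun k =>
          decide (pvG word k ≠ pvG word (k + 1) ∧
            (pvG word k ≠ pvG word i ∨ pvG word (k + 1) ≠ pvG word j))) = true := by
        rw [h]; simp [hb]
      rw [if_pos ha]
    · rw [if_neg hb]
      have ha : (PySem.List.pyRange i j 1).any (fun k =>
          decide (pvG word k ≠ pvG word (k + 1) ∧
            (pvG word k ≠ pvG word i ∨ pvG word (k + 1) ≠ pvG word j))) = false := by
        rw [h]; simp only [decide_eq_false_iff_not]; exact hb
      rw [if_neg (by rw [ha]; exact Bool.false_ne_true)]
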